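-- pv_equiv track=rewrite | github.com/sabinemnsour/bibliometric-dashboard | app.py | detect_interpretation_community
-- ===== SOURCE A (Python) =====
-- def detect_interpretation_community(members):
--     members_set = set(a.lower() for a in members)
--
--     if any(a in members_set for a in ["clara bourot", "laurence reboul", "jean marc freyermuth"]):
--         return "This group appears to be a close-knit and productive research cell, shaped around strong collaborations. Authors like Clara Bourot, Laurence Reboul, and Jean-Marc Freyermuth anchor the group — likely tied by shared themes or long-term projects."
--     elif any(a in members_set for a in ["elisabeth remy", "anais baudot", "laurent tichit"]):
--         return "This community reflects a densely connected and interdisciplinary team. Figures such as Elisabeth Remy, Anaïs Baudot, and Laurent Tichit point to cross-cutting collaborations — possibly blending biology, computation, and medical science."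
--     elif any(a in members_set for a in ["badih ghattas", "erwan rousseau", "quentin ghibaudo"]):
--         return "This subnetwork reveals a methodologically-oriented cluster. With researchers like Badih Ghattas, Erwan Rousseau, and Quentin Ghibaudo, this group may specialize in statistical modeling, data-driven methodologies, or applied mathematics."
--     else:
--         return "This community is structurally relevant within the I2M collaboration network. While it doesn’t feature a dominant core, its composition still suggests coordinated research activity worth deeper exploration."
-- ===== SOURCE B (Python) =====
-- _PRIORITY = {
--     "clara bourot": 0, "laurence reboul": 0, "jean marc freyermuth": 0,
--     "elisabeth remy": 1, "anais baudot": 1, "laurent tichit": 1,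
--     "badih ghattas": 2, "erwan rousseau": 2, "quentin ghibaudo": 2,
-- }
--
-- _MESSAGES = [
--     "This group appears to be a close-knit and productive research cell, shaped around strong collaborations. Authors like Clara Bourot, Laurence Reboul, and Jean-Marc Freyermuth anchor the group — likely tied by shared themes or long-term projects.",
--     "This community reflects a densely connected and interdisciplinary team. Figures such as Elisabeth Remy, Anaïs Baudot, and Laurent Tichit point to cross-cutting collaborations — possibly blending biology, computation, and medical science.",
--     "This subnetwork reveals a methodologically-oriented cluster. With researchers like Badih Ghattas, Erwan Rousseau, and Quentin Ghibaudo, this group may specialize in statistical modeling, data-driven methodologies, or applied mathematics.",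
--     "This community is structurally relevant within the I2M collaboration network. While it doesn’t feature a dominant core, its composition still suggests coordinated research activity worth deeper exploration.",
-- ]
--
--
-- def detect_interpretation_community(members):
--     best = 3
--     for m in members:
--         p = _PRIORITY.get(m.lower(), 3)
--         if p < best:
--             best = p
--     return _MESSAGES[best]
-- ===== Notes on version B (the rewrite author's own statement) =====
-- stated objective: alternative
-- what changed: Replaces the three fixed-list scans against a set of lowered members by a priority table keyed by known author name and a single pass over the members keeping the minimum priority, indexing a message list at the end.
import Mathlib
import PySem

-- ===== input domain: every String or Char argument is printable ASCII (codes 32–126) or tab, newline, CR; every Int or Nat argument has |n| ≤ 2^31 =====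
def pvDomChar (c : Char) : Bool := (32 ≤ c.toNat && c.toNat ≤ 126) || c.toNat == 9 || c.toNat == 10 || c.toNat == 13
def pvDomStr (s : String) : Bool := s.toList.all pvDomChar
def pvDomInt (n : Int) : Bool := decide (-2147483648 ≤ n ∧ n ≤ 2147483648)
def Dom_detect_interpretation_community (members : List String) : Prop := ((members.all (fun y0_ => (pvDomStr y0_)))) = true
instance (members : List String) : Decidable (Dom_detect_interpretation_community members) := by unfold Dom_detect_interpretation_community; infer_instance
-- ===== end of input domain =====

-- B replaces A's three fixed-list scans against a set of lowered members by one priority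
-- table plus a single min-keeping pass over the members (objective: alternative).

-- ===== PORT A =====
def pvG0 : List String := ["clara bourot", "laurence reboul", "jean marc freyermuth"]
def pvG1 : List String := ["elisabeth remy", "anais baudot", "laurent tichit"]
def pvG2 : List String := ["badih ghattas", "erwan rousseau", "quentin ghibaudo"]
def pvMsg0 : String := "This group appears to be a close-knit and productive research cell, shaped around strong collaborations. Authors like Clara Bourot, Laurence Reboul, and Jean-Marc Freyermuth anchor the group — likely tied by shared themes or long-term projects."
def pvMsg1 : String := "This community reflects a densely connected and interdisciplinary team. Figures such as Elisabeth Remy, Anaïs Baudot, and Laurent Tichit point to cross-cutting collaborations — possibly blending biology, computation, and medical science."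
def pvMsg2 : String := "This subnetwork reveals a methodologically-oriented cluster. With researchers like Badih Ghattas, Erwan Rousseau, and Quentin Ghibaudo, this group may specialize in statistical modeling, data-driven methodologies, or applied mathematics."
def pvMsg3 : String := "This community is structurally relevant within the I2M collaboration network. While it doesn’t feature a dominant core, its composition still suggests coordinated research activity worth deeper exploration."

def detect_interpretation_community (members : List String) : String :=
  let members_set : PySem.Set String := PySem.Set.ofList (members.map PySem.Str.lower)
  if pvG0.any (fun a => PySem.Set.contains members_set a) then pvMsg0
  else if pvG1.any (fun a => PySem.Set.contains members_set a) then pvMsg1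
  else if pvG2.any (fun a => PySem.Set.contains members_set a) then pvMsg2
  else pvMsg3

-- ===== PORT B =====
def pvPriority : PySem.Dict String Nat := PySem.Dict.ofList
  [("clara bourot", 0), ("laurence reboul", 0), ("jean marc freyermuth", 0),
   ("elisabeth remy", 1), ("anais baudot", 1), ("laurent tichit", 1),
   ("badih ghattas", 2), ("erwan rousseau", 2), ("quentin ghibaudo", 2)]

def pvMessages : List String := [pvMsg0, pvMsg1, pvMsg2, pvMsg3]

def detect_interpretation_community_alt (members : List String) : String :=
  let best := members.foldl
    (fun best m =>
      let p := pvPriority.getD (PySem.Str.lower m) 3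
      if p < best then p else best) 3
  -- list index _MESSAGES[best]: best ≤ 3 throughout the loop, so the index is in range
  pvMessages.getD best ""

-- ===== PRECONDITION & SPEC =====
def Spec_detect_interpretation_community (members : List String) (out : String) : Prop := out = detect_interpretation_community_alt members
instance (members : List String) (out : String) : Decidable (Spec_detect_interpretation_community members out) := by unfold Spec_detect_interpretation_community; infer_instance

-- ===== CLAIM (what is proved, stated in full; the proofs are below) =====
def Claim_equal_detect_interpretation_community : Prop := ∀ (members : List String), Dom_detect_interpretation_community members → Spec_detect_interpretation_community members (detect_interpretation_community members)

-- ===== LEMMAS AND PROOFS =====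

theorem pvPriority_mk : pvPriority = PySem.Dict.mk
    [("clara bourot", 0), ("laurence reboul", 0), ("jean marc freyermuth", 0),
     ("elisabeth remy", 1), ("anais baudot", 1), ("laurent tichit", 1),
     ("badih ghattas", 2), ("erwan rousseau", 2), ("quentin ghibaudo", 2)] := by decide

-- priority lookup characterised by group membership of the (already lowered) name
theorem pvPrio_eval (s : String) :
    pvPriority.getD s 3 =
      (if pvG0.contains s then 0 else if pvG1.contains s then 1
       else if pvG2.contains s then 2 else 3) := by
  rw [pvPriority_mk]
  simp only [PySem.Dict.getD_eq_get?_getD, PySem.Dict.get?_mk_cons, pvG0, pvG1, pvG2,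
    List.contains_cons, List.contains_nil, Bool.or_false, beq_iff_eq]
  split_ifs <;>
    first
      | rfl
      | (simp only [beq_iff_eq, Bool.or_eq_true, not_or] at *; aesop)

-- the fold keeps the minimum priority seen (accumulator stays ≤ 3)
theorem pvFold_min (f : String → Nat) (ms : List String) (b : Nat) (hb : b ≤ 3) :
    ms.foldl (fun best m => let p := f m; if p < best then p else best) b
      = min b (ms.foldl (fun best m => let p := f m; if p < best then p else best) 3) := by
  induction ms generalizing b with
  | nil => simp; omega
  | cons m ms ih =>
    simp only [List.foldl_cons]
    rw [ih _ (by split_ifs <;> omega), ih (if f m < 3 then f m else 3) (by split_ifs <;> omega)]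
    generalize ms.foldl (fun best m => let p := f m; if p < best then p else best) 3 = X
    split_ifs <;> omega

-- one step of the min chain, on the boolean skeleton
theorem pvMin_chain (p0 p1 p2 q0 q1 q2 : Bool) :
    min (if (if p0 then (0:Nat) else if p1 then 1 else if p2 then 2 else 3) < 3
           then (if p0 then (0:Nat) else if p1 then 1 else if p2 then 2 else 3) else 3)
        (if q0 then 0 else if q1 then 1 else if q2 then 2 else 3)
      = (if (p0 || q0) then 0 else if (p1 || q1) then 1 else if (p2 || q2) then 2 else 3) := by
  revert p0 p1 p2 q0 q1 q2; decide

theorem pvBest_eval (ms : List String) :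
    ms.foldl (fun best m =>
        let p := pvPriority.getD (PySem.Str.lower m) 3
        if p < best then p else best) 3
      = (if ms.any (fun m => pvG0.contains (PySem.Str.lower m)) then 0
         else if ms.any (fun m => pvG1.contains (PySem.Str.lower m)) then 1
         else if ms.any (fun m => pvG2.contains (PySem.Str.lower m)) then 2 else 3) := by
  induction ms with
  | nil => simp
  | cons m ms ih =>
    simp only [List.foldl_cons, List.any_cons]
    rw [pvFold_min _ _ _ (by rw [pvPrio_eval]; split_ifs <;> omega), ih, pvPrio_eval,
      pvMin_chain]
    rfl

theorem pvCond_eq (g ms : List String) :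
    (g.any fun a => PySem.Set.contains (PySem.Set.ofList (ms.map PySem.Str.lower)) a)
      = ms.any (fun m => g.contains (PySem.Str.lower m)) := by
  rw [Bool.eq_iff_iff]
  simp only [List.any_eq_true, PySem.Set.contains_iff, PySem.Set.mem_ofList, List.mem_map,
    List.contains_iff_mem]
  constructor
  · rintro ⟨a, ha, m, hm, rfl⟩; exact ⟨m, hm, ha⟩
  · rintro ⟨m, hm, hg⟩; exact ⟨_, hg, m, hm, rfl⟩

-- ===== VERDICT (by name: the statement is the Claim_ definition above) =====
theorem detect_interpretation_community_spec : Claim_equal_detect_interpretation_community := by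
  intro members _
  unfold Spec_detect_interpretation_community detect_interpretation_community
    detect_interpretation_community_alt
  simp only [pvCond_eq, pvBest_eval]
  split_ifs <;> rfl
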